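-- pv_equiv track=rewrite | github.com/JeanPierreLeon/repositoriojeanpi | apoyo.py | calcular_sucesion
-- ===== SOURCE A (Python) =====
-- def calcular_sucesion(n):
--         suma=0
--         for i in range(0,n):
--             if i%2==0:
--                 suma += -2*i
--             else:
--                 suma += 3*(i+2)
--         return suma
-- ===== SOURCE B (Python) =====
-- def calcular_sucesion(n):
--     # Closed form: even i<n contribute -2*i, odd i<n contribute 3*(i+2).
--     if n <= 0:
--         return 0
--     e = (n + 1) // 2   # number of even indices in [0, n)
--     o = n // 2         # number of odd indices in [0, n)
--     return -2 * e * (e - 1) + 3 * o * (o + 2)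
-- ===== Notes on version B (the rewrite author's own statement) =====
-- stated objective: faster
-- what changed: Replaced the O(n) loop over range(0, n) by a closed-form arithmetic-series formula splitting even and odd indices.
import Mathlib
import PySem

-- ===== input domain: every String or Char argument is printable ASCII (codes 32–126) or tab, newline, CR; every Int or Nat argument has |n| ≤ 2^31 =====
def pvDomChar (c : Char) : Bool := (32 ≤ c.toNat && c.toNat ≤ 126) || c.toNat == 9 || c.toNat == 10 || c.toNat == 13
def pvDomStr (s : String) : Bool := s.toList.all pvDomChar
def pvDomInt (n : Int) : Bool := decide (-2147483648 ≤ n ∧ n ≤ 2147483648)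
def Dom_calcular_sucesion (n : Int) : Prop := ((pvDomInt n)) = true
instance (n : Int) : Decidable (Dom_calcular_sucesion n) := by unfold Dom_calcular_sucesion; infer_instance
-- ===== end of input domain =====

-- B replaces A's O(n) loop by a closed-form even/odd arithmetic-series formula (asymptotically faster).


-- ===== PORT A =====
def calcular_sucesion (n : Int) : Int :=
  (PySem.List.pyRange 0 n 1).foldl
    (fun suma i => if PySem.Int.mod i 2 = 0 then suma + (-2 * i) else suma + 3 * (i + 2)) 0

-- ===== PORT B =====
def calcular_sucesion_alt (n : Int) : Int :=
  if n ≤ 0 then 0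
  else
    -- e = number of even indices, o = number of odd indices in [0, n)
    -2 * (PySem.Int.floordiv (n + 1) 2) * (PySem.Int.floordiv (n + 1) 2 - 1)
      + 3 * (PySem.Int.floordiv n 2) * (PySem.Int.floordiv n 2 + 2)

-- ===== PRECONDITION & SPEC =====
def Spec_calcular_sucesion (n : Int) (out : Int) : Prop := out = calcular_sucesion_alt n
instance (n : Int) (out : Int) : Decidable (Spec_calcular_sucesion n out) := by unfold Spec_calcular_sucesion; infer_instance

-- ===== CLAIM (what is proved, stated in full; the proofs are below) =====
def Claim_equal_calcular_sucesion : Prop := ∀ (n : Int), Dom_calcular_sucesion n → Spec_calcular_sucesion n (calcular_sucesion n)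

-- ===== LEMMAS AND PROOFS =====

theorem calcular_sucesion_nat (m : Nat) :
    calcular_sucesion (m : Int) = calcular_sucesion_alt (m : Int) := by
  induction m with
  | zero =>
    simp [calcular_sucesion, calcular_sucesion_alt]
  | succ k ih =>
    have h0 : (0 : Int) ≤ (k : Int) := Int.natCast_nonneg k
    have hstep : PySem.List.pyRange 0 ((k : Int) + 1) 1
        = PySem.List.pyRange 0 (k : Int) 1 ++ [(k : Int)] :=
      PySem.List.pyRange_one_succ_right h0
    have hcast : ((k + 1 : Nat) : Int) = (k : Int) + 1 := by push_cast; ring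
    unfold calcular_sucesion at ih ⊢
    rw [hcast, hstep, List.foldl_append]
    rw [ih]
    simp only [List.foldl]
    have hm : PySem.Int.mod (k : Int) 2 = (k : Int) % 2 :=
      PySem.Int.mod_eq_emod_of_pos (by norm_num)
    have hd1 : PySem.Int.floordiv ((k : Int) + 1) 2 = ((k : Int) + 1) / 2 :=
      PySem.Int.floordiv_eq_ediv_of_pos (by norm_num)
    have hd2 : PySem.Int.floordiv ((k : Int) + 1 + 1) 2 = ((k : Int) + 1 + 1) / 2 :=
      PySem.Int.floordiv_eq_ediv_of_pos (by norm_num)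
    have hd3 : PySem.Int.floordiv (k : Int) 2 = (k : Int) / 2 :=
      PySem.Int.floordiv_eq_ediv_of_pos (by norm_num)
    unfold calcular_sucesion_alt
    simp only [hm, hd1, hd2, hd3]
    rcases Int.emod_two_eq_zero_or_one (k : Int) with he | he
    · obtain ⟨j, hj⟩ : ∃ j : Int, (k : Int) = 2 * j := by
        refine ⟨(k : Int) / 2, ?_⟩; omega
      rw [hj] at he ⊢
      have e1 : (2 * j + 1) / 2 = j := by omega
      have e2 : (2 * j + 1 + 1) / 2 = j + 1 := by omega
      have e3 : (2 * j) / 2 = j := by omega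
      simp only [he, e1, e2, e3, if_true]
      rcases eq_or_ne j 0 with hz | hz
      · subst hz; norm_num
      · rw [if_neg (show ¬((2 * j : Int) ≤ 0) by omega),
            if_neg (show ¬((2 * j + 1 : Int) ≤ 0) by omega)]
        ring1
    · obtain ⟨j, hj⟩ : ∃ j : Int, (k : Int) = 2 * j + 1 := by
        refine ⟨(k : Int) / 2, ?_⟩; omega
      rw [hj] at he ⊢
      have e1 : (2 * j + 1 + 1) / 2 = j + 1 := by omega
      have e2 : (2 * j + 1 + 1 + 1) / 2 = j + 1 := by omega
      have e3 : (2 * j + 1) / 2 = j := by omega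
      simp only [he, e1, e2, e3]
      rw [if_neg (show ¬((1 : Int) = 0) by norm_num),
          if_neg (show ¬((2 * j + 1 : Int) ≤ 0) by omega),
          if_neg (show ¬((2 * j + 1 + 1 : Int) ≤ 0) by omega)]
      ring1
    
-- ===== VERDICT (by name: the statement is the Claim_ definition above) =====
theorem calcular_sucesion_spec : Claim_equal_calcular_sucesion := by
  intro n _
  show calcular_sucesion n = calcular_sucesion_alt n
  by_cases hn : n ≤ 0
  · simp [calcular_sucesion, calcular_sucesion_alt, PySem.List.pyRange_one_eq_nil hn, hn]
  · have : n = ((n.toNat : Nat) : Int) := by omega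
    rw [this]; exact calcular_sucesion_nat n.toNat
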